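-- pv_equiv track=rewrite | github.com/MrChebur/Multiplication_table_for_children | code/generate.py | _generate_uniq_permutations
-- ===== SOURCE A (Python) =====
-- import itertools
--
-- def _generate_uniq_permutations(list1: list, list2: list) -> list:
--     """
--     Generates all possible permutations of the values in the two lists without repeats.
--
--     :param list1: First list of values
--     :param list2: Second list of values
--     :return: List of permutations of the values without repeats
--     """
--     permutations_list = []
--     for first_multiplier in list1:
--         for second_multiplier in list2:
--             multipliers = [first_multiplier, second_multiplier]
--             multipliers.sort()
--             permutations_list.append(multipliers)
--
--     permutations_list.sort()
--     permutations_list_without_repeats = list(k for k, _ in itertools.groupby(permutations_list))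
--     return permutations_list_without_repeats
-- ===== SOURCE B (Python) =====
-- def _generate_uniq_permutations(list1: list, list2: list) -> list:
--     """Set-based dedup of sorted pairs, then one final sort (idiomatic rewrite)."""
--     pairs = {(a, b) if a <= b else (b, a) for a in list1 for b in list2}
--     return [list(p) for p in sorted(pairs)]
-- ===== Notes on version B (the rewrite author's own statement) =====
-- stated objective: idiomatic
-- what changed: Replaces A's append-all-pairs / global sort / groupby-adjacent-dedup pipeline with a set comprehension of ordered tuples (dedup on insertion) followed by a single sorted() over the distinct pairs.
import Mathlib
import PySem

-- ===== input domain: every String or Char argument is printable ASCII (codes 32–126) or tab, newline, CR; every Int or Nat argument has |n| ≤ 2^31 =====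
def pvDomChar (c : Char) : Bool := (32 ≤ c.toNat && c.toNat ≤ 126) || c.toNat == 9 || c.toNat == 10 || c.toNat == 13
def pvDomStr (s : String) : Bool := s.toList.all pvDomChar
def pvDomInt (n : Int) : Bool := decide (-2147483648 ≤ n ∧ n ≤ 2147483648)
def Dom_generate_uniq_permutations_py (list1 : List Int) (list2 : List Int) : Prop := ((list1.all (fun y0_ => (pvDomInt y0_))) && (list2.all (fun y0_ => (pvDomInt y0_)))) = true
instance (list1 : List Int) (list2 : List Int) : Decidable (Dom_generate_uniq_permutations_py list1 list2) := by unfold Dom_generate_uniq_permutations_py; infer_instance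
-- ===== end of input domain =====

-- B replaces A's sort-each-pair / append / global sort / groupby-dedup pipeline by a set of
-- ordered pairs deduplicated on insertion plus one final sort (objective: idiomatic).

-- ===== PORT A =====
-- 'list(k for k, _ in itertools.groupby(xs))': the first key of every run of equal adjacent elements
def pvGroupbyKeys (xs : List (List Int)) : List (List Int) :=
  match xs with
  | [] => []
  | x :: rest => x :: pvGroupbyKeys (rest.dropWhile (fun y => y == x))
termination_by xs.length
decreasing_by simp only [List.length_cons]; exact Nat.lt_succ_of_le (List.length_dropWhile_le _ _)

def generate_uniq_permutations_py (list1 : List Int) (list2 : List Int) : List (List Int) :=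
  let permutations_list :=
    list1.foldl (fun acc first_multiplier =>
      list2.foldl (fun acc second_multiplier =>
        acc ++ [PySem.List.sorted [first_multiplier, second_multiplier] (fun x => x)]) acc) []
  let sortedList := PySem.List.sorted permutations_list (fun x => x)
  pvGroupbyKeys sortedList

-- ===== PORT B =====
def generate_uniq_permutations_py_alt (list1 : List Int) (list2 : List Int) : List (List Int) :=
  let pairs : PySem.Set (Int × Int) :=
    list1.foldl (fun s a =>
      list2.foldl (fun s b => PySem.Set.add s (if a ≤ b then (a, b) else (b, a))) s)
      PySem.Set.empty
  (PySem.List.sorted2 pairs (fun p => p.1) (fun p => p.2)).map (fun p => [p.1, p.2])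

-- ===== PRECONDITION & SPEC =====
def Spec_generate_uniq_permutations_py (list1 : List Int) (list2 : List Int) (out : List (List Int)) : Prop := out = generate_uniq_permutations_py_alt list1 list2
instance (list1 : List Int) (list2 : List Int) (out : List (List Int)) : Decidable (Spec_generate_uniq_permutations_py list1 list2 out) := by unfold Spec_generate_uniq_permutations_py; infer_instance

-- ===== CLAIM (what is proved, stated in full; the proofs are below) =====
def Claim_equal_generate_uniq_permutations_py : Prop := ∀ (list1 : List Int) (list2 : List Int), Dom_generate_uniq_permutations_py list1 list2 → Spec_generate_uniq_permutations_py list1 list2 (generate_uniq_permutations_py list1 list2)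

-- ===== LEMMAS AND PROOFS =====

def pvPair (a b : Int) : Int × Int := if a ≤ b then (a, b) else (b, a)
def pvKey (p : Int × Int) : List Int := [p.1, p.2]
def pvCross (list1 list2 : List Int) : List (Int × Int) :=
  list1.flatMap (fun a => list2.map (pvPair a))

theorem pv_lt_two (a b c d : Int) : ([a, b] < [c, d]) ↔ (a < c ∨ (a = c ∧ b < d)) := by
  constructor
  · intro h
    cases h with
    | rel h => exact Or.inl h
    | cons h =>
      cases h with
      | rel h => exact Or.inr ⟨rfl, h⟩
      | cons h => cases h
  · rintro (h | ⟨rfl, h⟩)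
    · exact List.Lex.rel h
    · exact List.Lex.cons (List.Lex.rel h)

theorem pvKey_injective : Function.Injective pvKey := by
  rintro ⟨a, b⟩ ⟨c, d⟩ h
  simp [pvKey] at h
  simp [h.1, h.2]

theorem pv_sorted_two (a b : Int) :
    PySem.List.sorted [a, b] (fun x => x) = pvKey (pvPair a b) := by
  rw [PySem.List.sorted_eq_foldl_insertBy]
  simp only [List.foldl, PySem.List.insertBy, pvPair, pvKey]
  split_ifs <;> (simp_all; try omega)

theorem pv_A_shape (list1 list2 : List Int) :
    generate_uniq_permutations_py list1 list2 =
      pvGroupbyKeys (PySem.List.sorted ((pvCross list1 list2).map pvKey) (fun x => x)) := by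
  unfold generate_uniq_permutations_py
  simp only [pv_sorted_two, PySem.List.foldl_append_singleton_eq_map,
    PySem.List.foldl_append_eq_flatMap, List.nil_append, pvCross, List.map_flatMap, List.map_map]
  rfl

theorem pv_B_set (list1 list2 : List Int) :
    list1.foldl (fun s a =>
      list2.foldl (fun s b => PySem.Set.add s (if a ≤ b then (a, b) else (b, a))) s)
      PySem.Set.empty = PySem.Set.ofList (pvCross list1 list2) := by
  rw [PySem.Set.ofList_eq_foldl, pvCross, List.foldl_flatMap]
  simp only [List.foldl_map, pvPair, PySem.Set.empty]

theorem pv_sorted2_eq (xs : List (Int × Int)) :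
    PySem.List.sorted2 xs (fun p => p.1) (fun p => p.2) =
      PySem.List.sorted xs pvKey := by
  rw [PySem.List.sorted_eq_foldl_insertBy, PySem.List.sorted2]
  have hbe : (fun (p q : Int × Int) => decide (p.1 < q.1) || (!decide (q.1 < p.1) && decide (p.2 < q.2)))
      = (fun p q => decide (pvKey p < pvKey q)) := by
    funext p q
    rcases p with ⟨a, b⟩
    rcases q with ⟨c, d⟩
    simp only [pvKey, pv_lt_two]
    by_cases h1 : a < c <;> by_cases h2 : c < a <;> by_cases h3 : b < d <;>
      simp [h1, h2, h3] <;> omega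
  simp only [if_neg (by decide : ¬ (false = true))]
  rw [hbe]

theorem pv_mem_groupby (xs : List (List Int)) (y : List Int) :
    y ∈ pvGroupbyKeys xs ↔ y ∈ xs := by
  induction xs using pvGroupbyKeys.induct with
  | case1 => simp [pvGroupbyKeys]
  | case2 x rest ih =>
    rw [pvGroupbyKeys]
    simp only [List.mem_cons, ih]
    constructor
    · rintro (rfl | h)
      · exact Or.inl rfl
      · exact Or.inr ((List.dropWhile_sublist _).mem h)
    · rintro (rfl | h)
      · exact Or.inl rfl
      · have hsplit := List.takeWhile_append_dropWhile (p := fun y => y == x) (l := rest)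
        rw [← hsplit] at h
        rcases List.mem_append.mp h with ht | hd
        · have := List.mem_takeWhile_imp ht
          simp_all
        · exact Or.inr hd

theorem pv_lt_dropWhile (x : List Int) (xs : List (List Int))
    (hall : ∀ z ∈ xs, x ≤ z) (hp : xs.Pairwise (· ≤ ·)) :
    ∀ y ∈ xs.dropWhile (fun y => y == x), x < y := by
  induction xs with
  | nil => simp
  | cons z zs ih =>
    by_cases hz : z = x
    · rw [List.dropWhile_cons_of_pos (by simp [hz])]
      exact ih (fun w hw => hall w (List.mem_cons_of_mem _ hw)) hp.tail
    · rw [List.dropWhile_cons_of_neg (by simp [hz])]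
      intro y hy
      have hxz : x < z := lt_of_le_of_ne (hall z (List.mem_cons_self)) (Ne.symm hz)
      rcases List.mem_cons.mp hy with rfl | hy
      · exact hxz
      · exact lt_of_lt_of_le hxz (List.rel_of_pairwise_cons hp hy)

theorem pv_pairwise_groupby (xs : List (List Int)) (hp : xs.Pairwise (· ≤ ·)) :
    (pvGroupbyKeys xs).Pairwise (· < ·) := by
  induction xs using pvGroupbyKeys.induct with
  | case1 => simp [pvGroupbyKeys]
  | case2 x rest ih =>
    rw [pvGroupbyKeys]
    refine List.Pairwise.cons ?_ (ih (List.Pairwise.sublist (List.dropWhile_sublist _) hp.tail))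
    intro y hy
    exact pv_lt_dropWhile x rest (fun z hz => List.rel_of_pairwise_cons hp hz) hp.tail y
      ((pv_mem_groupby _ y).mp hy)

theorem pv_sorted_inst (M : List (List Int)) :
    @PySem.List.sorted (List ℤ) (List ℤ) List.instLT (fun a b => a.decidableLT b) M (fun x => x) false
      = @PySem.List.sorted (List ℤ) (List ℤ) List.instLinearOrder.toLT LinearOrder.toDecidableLT M (fun x => x) false := by
  rw [@PySem.List.sorted_eq_foldl_insertBy (List ℤ) (List ℤ) List.instLT (fun a b => a.decidableLT b) M (fun x => x),
      @PySem.List.sorted_eq_foldl_insertBy (List ℤ) (List ℤ) List.instLinearOrder.toLT LinearOrder.toDecidableLT M (fun x => x)]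
  exact congrArg (fun bf => List.foldl (fun acc x => PySem.List.insertBy bf x acc) [] M)
    (by funext a b; exact decide_eq_decide.mpr Iff.rfl)

theorem pv_sorted_inst2 (S : List (Int × Int)) :
    @PySem.List.sorted (Int × Int) (List ℤ) List.instLT (fun a b => a.decidableLT b) S pvKey false
      = @PySem.List.sorted (Int × Int) (List ℤ) List.instLinearOrder.toLT LinearOrder.toDecidableLT S pvKey false := by
  rw [@PySem.List.sorted_eq_foldl_insertBy (Int × Int) (List ℤ) List.instLT (fun a b => a.decidableLT b) S pvKey,
      @PySem.List.sorted_eq_foldl_insertBy (Int × Int) (List ℤ) List.instLinearOrder.toLT LinearOrder.toDecidableLT S pvKey]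
  exact congrArg (fun bf => List.foldl (fun acc x => PySem.List.insertBy bf x acc) [] S)
    (by funext a b; exact decide_eq_decide.mpr Iff.rfl)

theorem pv_strict_sorted_set (l : List (Int × Int)) :
    ((@PySem.List.sorted (Int × Int) (List ℤ) List.instLinearOrder.toLT LinearOrder.toDecidableLT
        (PySem.Set.ofList l) pvKey false).map pvKey).Pairwise (· < ·) := by
  rw [List.pairwise_map]
  have hp := PySem.List.sorted_pairwise (PySem.Set.ofList l) pvKey
  have hnd : (@PySem.List.sorted (Int × Int) (List ℤ) List.instLinearOrder.toLT LinearOrder.toDecidableLT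
      (PySem.Set.ofList l) pvKey false).Pairwise (fun a b => a ≠ b) :=
    (@PySem.List.sorted_perm (Int × Int) (List ℤ) List.instLinearOrder.toLT LinearOrder.toDecidableLT
      (PySem.Set.ofList l) pvKey false).symm.nodup (PySem.Set.nodup_ofList l)
  exact (hp.and hnd).imp (fun {a b} h =>
    lt_of_le_of_ne h.1 (fun hk => h.2 (pvKey_injective hk)))

theorem pv_B_shape (list1 list2 : List Int) :
    generate_uniq_permutations_py_alt list1 list2 =
      (PySem.List.sorted (PySem.Set.ofList (pvCross list1 list2)) pvKey).map pvKey := by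
  show (PySem.List.sorted2 (list1.foldl (fun s a =>
      list2.foldl (fun s b => PySem.Set.add s (if a ≤ b then (a, b) else (b, a))) s)
      PySem.Set.empty) (fun p => p.1) (fun p => p.2)).map (fun p => [p.1, p.2]) = _
  rw [pv_B_set, pv_sorted2_eq]
  rfl

-- ===== VERDICT (by name: the statement is the Claim_ definition above) =====
theorem generate_uniq_permutations_py_spec : Claim_equal_generate_uniq_permutations_py := by
  intro list1 list2 _
  unfold Spec_generate_uniq_permutations_py
  rw [pv_A_shape, pv_B_shape, pv_sorted_inst, pv_sorted_inst2]
  set M := (pvCross list1 list2).map pvKey with hM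
  set SM := @PySem.List.sorted (List ℤ) (List ℤ) List.instLinearOrder.toLT LinearOrder.toDecidableLT
    M (fun x => x) false with hSM
  set S' := @PySem.List.sorted (Int × Int) (List ℤ) List.instLinearOrder.toLT LinearOrder.toDecidableLT
    (PySem.Set.ofList (pvCross list1 list2)) pvKey false with hS'
  have hLp : (pvGroupbyKeys SM).Pairwise (· < ·) :=
    pv_pairwise_groupby _ (PySem.List.sorted_pairwise M (fun x => x))
  have hRp : (S'.map pvKey).Pairwise (· < ·) := pv_strict_sorted_set _
  have hLnd : (pvGroupbyKeys SM).Nodup := hLp.imp (fun h => ne_of_lt h)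
  have hRnd : (S'.map pvKey).Nodup := hRp.imp (fun h => ne_of_lt h)
  have hmem : ∀ y, y ∈ pvGroupbyKeys SM ↔ y ∈ S'.map pvKey := by
    intro y
    rw [pv_mem_groupby, hSM,
      @PySem.List.mem_sorted (List ℤ) (List ℤ) List.instLinearOrder.toLT LinearOrder.toDecidableLT M (fun x => x) false y]
    simp only [List.mem_map, hS',
      @PySem.List.mem_sorted (Int × Int) (List ℤ) List.instLinearOrder.toLT LinearOrder.toDecidableLT
        (PySem.Set.ofList (pvCross list1 list2)) pvKey false, PySem.Set.mem_ofList, hM]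
  exact List.Perm.eq_of_pairwise
    (fun a b _ _ hab hba => absurd hba (lt_asymm hab)) hLp hRp
    ((List.perm_ext_iff_of_nodup hLnd hRnd).mpr hmem)
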